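-- pv_equiv track=rewrite | github.com/adinashby-vanier-college/programming-in-science-midterm-v1-giacominaarcuri | Midterm.py | hollow_right_triangle
-- ===== SOURCE A (Python) =====
-- def hollow_right_triangle(n):
--     result = ""
--
--     if n < 4:
--         result += "The triangle height should be at least 4."
--     else:
--         for i in range(1, n + 1):
--             for j in range(i):
--                 if j == 0 or i == n or j + 1 == i:
--                     result += "*"
--                 else:
--                     result += " "
--
--             result += "\n"
--
--     return result.rstrip()
-- ===== SOURCE B (Python) =====
-- def hollow_right_triangle(n):
--     if n < 4:
--         return "The triangle height should be at least 4."
--     rows = []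
--     for i in range(1, n + 1):
--         if i == 1:
--             rows.append("*")
--         elif i == n:
--             rows.append("*" * n)
--         else:
--             rows.append("*" + " " * (i - 2) + "*")
--     return "\n".join(rows)
-- ===== Notes on version B (the rewrite author's own statement) =====
-- stated objective: simpler
-- what changed: Replaces the per-character nested loop with closed-form row construction (a lone star for the first row, a full line of stars for the bottom row, and star/spaces/star for middle rows) joined by newlines, so no per-cell conditional scan and no final rstrip is needed.
import Mathlib
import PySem

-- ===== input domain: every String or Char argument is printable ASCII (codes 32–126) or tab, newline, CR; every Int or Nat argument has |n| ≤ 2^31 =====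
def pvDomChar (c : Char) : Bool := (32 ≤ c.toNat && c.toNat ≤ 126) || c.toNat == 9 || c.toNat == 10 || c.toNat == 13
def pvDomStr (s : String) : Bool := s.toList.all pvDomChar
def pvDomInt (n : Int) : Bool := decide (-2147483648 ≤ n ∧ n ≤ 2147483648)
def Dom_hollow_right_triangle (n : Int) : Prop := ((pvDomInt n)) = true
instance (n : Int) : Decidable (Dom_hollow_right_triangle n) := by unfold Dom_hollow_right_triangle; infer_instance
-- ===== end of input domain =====

-- B replaces A's per-character nested loop by closed-form rows joined with '\n' (objective: simpler).

-- ===== PORT A =====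
-- strings are ported as List Char (PySem.Chars), wrapped back to String at the return
def hollow_right_triangle (n : Int) : String :=
  let result : List Char := []
  let result : List Char :=
    if n < 4 then
      result ++ "The triangle height should be at least 4.".toList
    else
      (PySem.List.pyRange 1 (n + 1) 1).foldl (fun res i =>
        ((PySem.List.pyRange 0 i 1).foldl
          (fun r j => r ++ [if j = 0 ∨ i = n ∨ j + 1 = i then '*' else ' ']) res) ++ ['\n'])
        result
  String.ofList (PySem.Chars.rstrip result)

-- ===== PORT B =====
def pvAltRow (n i : Int) : List Char :=
  if i = 1 then ['*']
  else if i = n then PySem.List.pyRepeat ['*'] n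
  else '*' :: (PySem.List.pyRepeat [' '] (i - 2) ++ ['*'])

def hollow_right_triangle_alt (n : Int) : String :=
  if n < 4 then "The triangle height should be at least 4."
  else
    String.ofList (PySem.Chars.join ['\n'] ((PySem.List.pyRange 1 (n + 1) 1).map (pvAltRow n)))

-- ===== PRECONDITION & SPEC =====
def Spec_hollow_right_triangle (n : Int) (out : String) : Prop := out = hollow_right_triangle_alt n
instance (n : Int) (out : String) : Decidable (Spec_hollow_right_triangle n out) := by unfold Spec_hollow_right_triangle; infer_instance

-- ===== CLAIM (what is proved, stated in full; the proofs are below) =====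
def Claim_equal_hollow_right_triangle : Prop := ∀ (n : Int), Dom_hollow_right_triangle n → Spec_hollow_right_triangle n (hollow_right_triangle n)

-- ===== LEMMAS AND PROOFS =====

-- A's row i (the inner loop, as a map) is exactly B's closed-form row, for 1 ≤ i ≤ n, 4 ≤ n
theorem pvRow_eq (n i : Int) (hn : 4 ≤ n) (h1 : 1 ≤ i) (h2 : i ≤ n) :
    (PySem.List.pyRange 0 i 1).map
      (fun j => if j = 0 ∨ i = n ∨ j + 1 = i then '*' else ' ') = pvAltRow n i := by
  unfold pvAltRow
  by_cases hi1 : i = 1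
  · subst hi1
    rw [if_pos rfl]
    have h01 : PySem.List.pyRange 0 1 1 = [0] := by decide
    rw [h01]; simp
  · rw [if_neg hi1]
    by_cases hin : i = n
    · subst hin
      rw [if_pos rfl, PySem.List.pyRepeat_singleton]
      have hmap : (PySem.List.pyRange 0 i 1).map
          (fun j => if j = 0 ∨ i = i ∨ j + 1 = i then '*' else ' ')
          = (PySem.List.pyRange 0 i 1).map (fun _ => '*') := by
        apply List.map_congr_left; intro j _; simp
      rw [hmap, List.map_const', PySem.List.length_pyRange_one]
      simp
    · rw [if_neg hin, PySem.List.pyRepeat_singleton]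
      rw [PySem.List.pyRange_one_cons (by omega : (0:Int) < i)]
      have hsplit : PySem.List.pyRange (0+1) i = PySem.List.pyRange 1 (i-1) ++ [i-1] := by
        have hx := PySem.List.pyRange_one_succ_right (a := 1) (b := i - 1) (by omega)
        rw [show i - 1 + 1 = i by ring] at hx
        simpa using hx
      rw [hsplit]
      simp only [List.map_cons, List.map_append, List.map_nil]
      have elast : (if i - 1 = 0 ∨ i = n ∨ (i - 1) + 1 = i then '*' else ' ') = '*' := by
        have h : i - 1 + 1 = i := by ring
        simp [h]
      have emid : (PySem.List.pyRange 1 (i-1)).map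
          (fun j => if j = 0 ∨ i = n ∨ j + 1 = i then '*' else ' ')
          = (PySem.List.pyRange 1 (i-1)).map (fun _ => ' ') := by
        apply List.map_congr_left; intro j hj
        rw [PySem.List.mem_pyRange_one] at hj
        have hno : ¬(j = 0 ∨ i = n ∨ j + 1 = i) := by
          push Not; exact ⟨by omega, hin, by omega⟩
        rw [if_neg hno]
      have h12 : (i - 1 - 1).toNat = (i - 2).toNat := by omega
      rw [elast, emid, List.map_const', PySem.List.length_pyRange_one, h12]
      simp

-- every B row ends in '*'
theorem pvRow_ends (n i : Int) (hn : 4 ≤ n) (h1 : 1 ≤ i) (h2 : i ≤ n) :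
    ∃ ys, pvAltRow n i = ys ++ ['*'] := by
  unfold pvAltRow
  by_cases hi1 : i = 1
  · exact ⟨[], by simp [hi1]⟩
  · by_cases hin : i = n
    · refine ⟨List.replicate (n.toNat - 1) '*', ?_⟩
      rw [if_neg hi1, if_pos hin, PySem.List.pyRepeat_singleton, ← List.replicate_succ']
      congr 1; omega
    · exact ⟨'*' :: PySem.List.pyRepeat [' '] (i-2), by simp [hi1, hin]⟩

theorem pvRstrip_append (a b : List Char) (hb : PySem.Chars.rstrip b ≠ []) :
    PySem.Chars.rstrip (a ++ b) = a ++ PySem.Chars.rstrip b := by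
  unfold PySem.Chars.rstrip at *
  have hdw : (b.reverse.dropWhile PySem.Chars.isspace).isEmpty = false := by
    cases hc : b.reverse.dropWhile PySem.Chars.isspace with
    | nil => exact absurd (by rw [hc]; rfl) hb
    | cons x xs => rfl
  rw [List.reverse_append, List.dropWhile_append, hdw]
  simp

-- rstrip of rows each followed by '\n' is the '\n'-join, when each row ends in '*'
theorem pvKey (rs : List (List Char)) (hne : rs ≠ [])
    (h : ∀ r ∈ rs, ∃ ys, r = ys ++ ['*']) :
    PySem.Chars.rstrip (rs.flatMap (fun r => r ++ ['\n'])) = PySem.Chars.join ['\n'] rs := by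
  induction rs with
  | nil => exact absurd rfl hne
  | cons r rest ih =>
    obtain ⟨ys, hy⟩ := h r (by simp)
    have hstar : PySem.Chars.rstrip (r ++ ['\n']) = r := by
      unfold PySem.Chars.rstrip
      rw [hy]
      simp [PySem.Chars.isspace, List.dropWhile]
    cases rest with
    | nil => simpa [PySem.Chars.join_singleton] using hstar
    | cons r2 rest2 =>
      have hrec := ih (by simp) (fun x hx => h x (by simp [hx]))
      have hne2 : PySem.Chars.rstrip ((r2 :: rest2).flatMap (fun r => r ++ ['\n'])) ≠ [] := by
        rw [hrec]
        obtain ⟨ys2, hy2⟩ := h r2 (by simp)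
        cases rest2 with
        | nil => simp [PySem.Chars.join_singleton, hy2]
        | cons r3 rest3 => rw [PySem.Chars.join_cons_cons]; simp [hy2]
      have hsplit : (r :: r2 :: rest2).flatMap (fun r => r ++ ['\n'])
          = (r ++ ['\n']) ++ (r2 :: rest2).flatMap (fun r => r ++ ['\n']) := by simp
      rw [hsplit, pvRstrip_append _ _ hne2, hrec, PySem.Chars.join_cons_cons]

-- ===== VERDICT (by name: the statement is the Claim_ definition above) =====
theorem hollow_right_triangle_spec : Claim_equal_hollow_right_triangle := by
  intro n _
  unfold Spec_hollow_right_triangle hollow_right_triangle hollow_right_triangle_alt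
  by_cases h : n < 4
  · simp only [if_pos h]; decide
  · simp only [if_neg h]
    have hn : 4 ≤ n := by omega
    -- collapse A's nested loop into a flatMap of per-row maps
    have hfold : (PySem.List.pyRange 1 (n + 1) 1).foldl (fun res i =>
        ((PySem.List.pyRange 0 i 1).foldl
          (fun r j => r ++ [if j = 0 ∨ i = n ∨ j + 1 = i then '*' else ' ']) res) ++ ['\n'])
        ([] : List Char)
        = (PySem.List.pyRange 1 (n + 1) 1).flatMap (fun i =>
            (PySem.List.pyRange 0 i 1).map
              (fun j => if j = 0 ∨ i = n ∨ j + 1 = i then '*' else ' ') ++ ['\n']) := by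
      have hfun : (fun (res : List Char) (i : Int) =>
          ((PySem.List.pyRange 0 i 1).foldl
            (fun r j => r ++ [if j = 0 ∨ i = n ∨ j + 1 = i then '*' else ' ']) res) ++ ['\n'])
          = fun res i => res ++ ((PySem.List.pyRange 0 i 1).map
              (fun j => if j = 0 ∨ i = n ∨ j + 1 = i then '*' else ' ') ++ ['\n']) := by
        funext res i
        rw [PySem.List.foldl_append_singleton_eq_map]
        simp
      rw [hfun, PySem.List.foldl_append_eq_flatMap]
      simp
    have hrows : (PySem.List.pyRange 1 (n + 1) 1).flatMap (fun i =>
          (PySem.List.pyRange 0 i 1).map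
            (fun j => if j = 0 ∨ i = n ∨ j + 1 = i then '*' else ' ') ++ ['\n'])
        = ((PySem.List.pyRange 1 (n + 1) 1).map (pvAltRow n)).flatMap (fun r => r ++ ['\n']) := by
      rw [List.flatMap_map]
      apply List.flatMap_congr
      intro x hx
      rw [PySem.List.mem_pyRange_one] at hx
      rw [pvRow_eq n x hn (by omega) (by omega)]
    rw [hfold, hrows, pvKey]
    · intro hnil
      have hlen := congrArg List.length hnil
      simp [PySem.List.length_pyRange_one] at hlen
      omega
    · intro r hr
      rw [List.mem_map] at hr
      obtain ⟨i, hi, rfl⟩ := hr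
      rw [PySem.List.mem_pyRange_one] at hi
      exact pvRow_ends n i hn (by omega) (by omega)
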